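-- pv_equiv track=rewrite | github.com/muslim39n/leetcode | medium/longest_word_in_dict.py | findLongestWord
-- ===== SOURCE A (Python) =====
-- from typing import List
--
-- def findLongestWord(s: str, dictionary: List[str]) -> str:
--     ans = ''
--
--     for t in dictionary:
--         if len(t) > len(s) or t[0] not in s:
--             continue
--
--         i = s.index(t[0]) + 1
--         j = 1
--
--         while j < len(t) and i < len(s) and i + len(t) - j <= len(s):
--             if s[i] == t[j]:
--                 j += 1
--
--             i += 1
--
--         if j == len(t) and (len(t) > len(ans) or len(t) == len(ans) and t < ans):
--             ans = t
--
--     return ans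
-- ===== SOURCE B (Python) =====
-- from typing import List
--
-- def findLongestWord(s: str, dictionary: List[str]) -> str:
--     for word in sorted(dictionary, key=lambda w: (-len(w), w)):
--         it = iter(s)
--         if all(c in it for c in word):
--             return word
--     return ''
-- ===== Notes on version B (the rewrite author's own statement) =====
-- stated objective: simpler
-- what changed: B sorts a copy of the dictionary by (-len(word), word) and returns the first word that is a subsequence of s via a single-iterator 'all(c in it for c in word)' test, replacing A's hand-rolled index/counter matching loop and running-best tie-break comparison with a sort that encodes the tie-break and an early return.
-- crash fix: A raises IndexError (''[0]) whenever the dictionary contains the empty string; B returns the longest then lexicographically smallest matching word there (the empty string itself matches any s). — e.g. on findLongestWord("ab", ["", "b"]): A raises IndexError, B returns "b"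
import Mathlib
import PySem

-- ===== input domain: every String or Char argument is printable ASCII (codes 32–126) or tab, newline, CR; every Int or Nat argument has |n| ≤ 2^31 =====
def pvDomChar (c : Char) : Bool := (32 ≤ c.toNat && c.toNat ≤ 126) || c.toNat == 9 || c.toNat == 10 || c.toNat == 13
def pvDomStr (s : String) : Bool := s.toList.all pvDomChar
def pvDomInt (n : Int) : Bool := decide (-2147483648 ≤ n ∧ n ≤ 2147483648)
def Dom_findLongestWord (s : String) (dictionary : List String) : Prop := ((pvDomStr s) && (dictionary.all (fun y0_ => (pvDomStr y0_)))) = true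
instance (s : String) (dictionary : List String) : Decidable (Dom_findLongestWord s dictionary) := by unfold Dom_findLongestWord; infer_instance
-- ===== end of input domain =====

-- B sorts a copy of the dictionary by (-len, word) and returns the first word that is a
-- subsequence of s (single-iterator test), replacing A's per-word index loop and running-best
-- comparison; objective: simpler.

-- ===== PORT A =====
-- the 'while j < len(t) and i < len(s) and i + len(t) - j <= len(s)' loop; returns the final j
def findLongestWordLoop (sl tl : List Char) (i j : Nat) : Nat :=
  if h : j < tl.length ∧ i < sl.length ∧ (i : Int) + tl.length - j ≤ sl.length then
    findLongestWordLoop sl tl (i + 1) (if sl.getD i ' ' = tl.getD j ' ' then j + 1 else j)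
  else j
termination_by sl.length - i
decreasing_by omega

-- one iteration of A's 'for t in dictionary' body (ans is the running best)
def findLongestWordStep (sl : List Char) (ans t : String) : String :=
  if t.toList.length > sl.length then ans
  else
    match t.toList with
    | [] => ans -- here Python evaluates t[0] and raises IndexError; such inputs are outside Pre_
    | c :: _ =>
      if ¬ sl.contains c then ans
      else
        let i := sl.idxOf c + 1
        let j := findLongestWordLoop sl t.toList i 1
        if j = t.toList.length ∧
            (t.toList.length > ans.toList.length ∨
              (t.toList.length = ans.toList.length ∧ t.toList < ans.toList)) then t else ans

def findLongestWord (s : String) (dictionary : List String) : String :=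
  dictionary.foldl (findLongestWordStep s.toList) ""

-- ===== PORT B =====
-- 'all(c in it for c in word)' with it = iter(s): each 'c in it' consumes the iterator
-- through the first occurrence of c
def subIter : List Char → List Char → Bool
  | _, [] => true
  | sl, c :: rest =>
    match sl.dropWhile (fun a => a ≠ c) with
    | [] => false
    | _ :: sl' => subIter sl' rest

def findLongestWord_alt (s : String) (dictionary : List String) : String :=
  ((PySem.List.sorted2 dictionary (fun w => -(PySem.Str.len w)) (fun w => w.toList)).find?
      (fun w => subIter s.toList w.toList)).getD ""

-- ===== PRECONDITION & SPEC =====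
-- Pre_ excludes dictionaries containing the empty string: on them A evaluates ''[0] and raises
-- IndexError (the 'len(t) > len(s)' guard never fires for '').
def Pre_findLongestWord (s : String) (dictionary : List String) : Prop := "" ∉ dictionary
instance (s : String) (dictionary : List String) : Decidable (Pre_findLongestWord s dictionary) := by unfold Pre_findLongestWord; infer_instance

def pvWitness_findLongestWord : String × List String := ("abpcplea", ["ale", "apple", "monkey", "plea"])

-- A raises IndexError whenever the dictionary contains the empty string; B returns the longest
-- (then lexicographically smallest) matching word, with '' itself matching any s
-- (checked by findLongestWord_raises at the bottom of the file).
def Raises_findLongestWord (s : String) (dictionary : List String) : Prop := "" ∈ dictionary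
instance (s : String) (dictionary : List String) : Decidable (Raises_findLongestWord s dictionary) := by unfold Raises_findLongestWord; infer_instance
def pvRaiseWitness_findLongestWord : String × List String := ("ab", ["", "b"])
def pvRaiseWitnessOut_findLongestWord : String := "b"

def Spec_findLongestWord (s : String) (dictionary : List String) (out : String) : Prop := out = findLongestWord_alt s dictionary
instance (s : String) (dictionary : List String) (out : String) : Decidable (Spec_findLongestWord s dictionary out) := by unfold Spec_findLongestWord; infer_instance

-- ===== CLAIM (what is proved, stated in full; the proofs are below) =====
def Claim_equal_findLongestWord : Prop := ∀ (s : String) (dictionary : List String), Dom_findLongestWord s dictionary → Pre_findLongestWord s dictionary → Spec_findLongestWord s dictionary (findLongestWord s dictionary)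
def Claim_raises_findLongestWord : Prop := (∀ (s : String) (dictionary : List String), Dom_findLongestWord s dictionary → Raises_findLongestWord s dictionary → ¬ Pre_findLongestWord s dictionary) ∧ (Dom_findLongestWord (pvRaiseWitness_findLongestWord.1) (pvRaiseWitness_findLongestWord.2) ∧ Raises_findLongestWord (pvRaiseWitness_findLongestWord.1) (pvRaiseWitness_findLongestWord.2) ∧ findLongestWord_alt (pvRaiseWitness_findLongestWord.1) (pvRaiseWitness_findLongestWord.2) = pvRaiseWitnessOut_findLongestWord)

-- ===== LEMMAS AND PROOFS =====

-- greedy subsequence test recursing on the haystack: proof-side normal form of both matchers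
def grSub : List Char → List Char → Bool
  | _, [] => true
  | [], _ :: _ => false
  | a :: sl, b :: tl => if a = b then grSub sl tl else grSub sl (b :: tl)

-- Python's sort key (-len(w), w) as a linear-order key (proof-side)
def kkey (w : String) : Lex (Int × List Char) := toLex (-(w.toList.length : Int), w.toList)

-- A's loop body rewritten through the matcher equivalence (proof-side)
def gStep (sl : List Char) (ans t : String) : String :=
  if grSub sl t.toList && decide (kkey t < kkey ans) then t else ans

theorem subIter_eq_grSub : ∀ (tl sl : List Char), subIter sl tl = grSub sl tl := by
  intro tl
  induction tl with
  | nil => intro sl; cases sl <;> rfl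
  | cons c rest ih =>
    intro sl
    induction sl with
    | nil => rfl
    | cons a sl' ihs =>
      by_cases h : a = c
      · subst h
        simp [subIter, grSub, List.dropWhile, ih]
      · simp [subIter, grSub, List.dropWhile, h] at ihs ⊢
        exact ihs

theorem grSub_length_le : ∀ (sl tl : List Char), grSub sl tl = true → tl.length ≤ sl.length := by
  intro sl
  induction sl with
  | nil => intro tl h; cases tl with
    | nil => simp
    | cons b tl => simp [grSub] at h
  | cons a sl ih =>
    intro tl h
    cases tl with
    | nil => simp
    | cons b tl =>
      by_cases hab : a = b
      · simp [grSub, hab] at h; have := ih tl h; simp; omega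
      · simp [grSub, hab] at h; have := ih (b :: tl) h; simp at this ⊢; omega

theorem grSub_head_mem : ∀ (sl : List Char) (c : Char) (rest : List Char),
    grSub sl (c :: rest) = true → c ∈ sl := by
  intro sl
  induction sl with
  | nil => intro c rest h; simp [grSub] at h
  | cons a sl ih =>
    intro c rest h
    by_cases hac : a = c
    · simp [hac]
    · simp [grSub, hac] at h
      exact List.mem_cons_of_mem _ (ih c rest h)

theorem grSub_idxOf : ∀ (sl : List Char) (c : Char) (rest : List Char), c ∈ sl →
    grSub sl (c :: rest) = grSub (sl.drop (sl.idxOf c + 1)) rest := by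
  intro sl
  induction sl with
  | nil => intro c rest h; simp at h
  | cons a sl ih =>
    intro c rest h
    by_cases hac : a = c
    · subst hac
      simp [grSub, List.idxOf_cons_self]
    · have hc : c ∈ sl := by cases h with
        | head => exact absurd rfl hac
        | tail _ h => exact h
      have : (a :: sl).idxOf c = sl.idxOf c + 1 := by
        simp [hac]
      rw [this]
      simp [grSub, hac]
      rw [ih c rest hc]

theorem loop_eq_grSub : ∀ (sl tl : List Char) (i j : Nat), j ≤ tl.length →
    ((findLongestWordLoop sl tl i j = tl.length) ↔ grSub (sl.drop i) (tl.drop j) = true) := by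
  intro sl tl
  have main : ∀ (n i j : Nat), sl.length - i ≤ n → j ≤ tl.length →
      ((findLongestWordLoop sl tl i j = tl.length) ↔ grSub (sl.drop i) (tl.drop j) = true) := by
    intro n
    induction n with
    | zero =>
      intro i j hn hj
      -- i ≥ sl.length
      have hi : sl.length ≤ i := by omega
      rw [findLongestWordLoop]
      rw [dif_neg (by omega)]
      rw [List.drop_of_length_le hi]
      by_cases hjt : j = tl.length
      · subst hjt; simp [grSub]
      · have : j < tl.length := by omega
        have hd : tl.drop j = tl[j] :: tl.drop (j+1) := List.drop_eq_getElem_cons this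
        rw [hd]
        simp [grSub]
        omega
    | succ n ihn =>
      intro i j hn hj
      rw [findLongestWordLoop]
      by_cases hg : j < tl.length ∧ i < sl.length ∧ (i : Int) + tl.length - j ≤ sl.length
      · rw [dif_pos hg]
        obtain ⟨hj', hi, hb⟩ := hg
        have hds : sl.drop i = sl[i] :: sl.drop (i+1) := List.drop_eq_getElem_cons hi
        have hdt : tl.drop j = tl[j] :: tl.drop (j+1) := List.drop_eq_getElem_cons hj'
        have hga : sl.getD i ' ' = sl[i] := List.getD_eq_getElem sl ' ' hi
        have hgb : tl.getD j ' ' = tl[j] := List.getD_eq_getElem tl ' ' hj'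
        rw [hds, hdt, hga, hgb]
        by_cases he : sl[i] = tl[j]
        · rw [if_pos he]
          rw [ihn (i+1) (j+1) (by omega) (by omega)]
          rw [List.drop_eq_getElem_cons hj'] at *
          simp [grSub, he]
        · rw [if_neg he]
          rw [ihn (i+1) j (by omega) hj]
          rw [hdt]
          simp [grSub, he]
      · rw [dif_neg hg]
        by_cases hjt : j = tl.length
        · subst hjt; simp [grSub, List.drop_of_length_le]
        · have hj2 : j < tl.length := by omega
          have hdt : tl.drop j = tl[j] :: tl.drop (j+1) := List.drop_eq_getElem_cons hj2
          constructor
          · intro h; omega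
          · intro h
            exfalso
            have hlen := grSub_length_le _ _ h
            rw [hdt] at hlen
            simp at hlen
            have h1 : tl.length - j ≤ sl.length - i := by
              have := List.length_drop (l := tl) (i := j)
              have := List.length_drop (l := sl) (i := i)
              omega
            -- guard failed: i ≥ sl.length or i + tl.length - j > sl.length
            push Not at hg
            by_cases hi : i < sl.length
            · have := hg hj2 hi
              omega
            · have : sl.length ≤ i := by omega
              rw [List.drop_of_length_le this] at h
              rw [hdt] at h
              simp [grSub] at h
  intro i j hj
  exact main (sl.length - i) i j (le_refl _) hj

theorem lexlt_iff (x y : Nat) (u v : List Char) :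
    toLex (-(x : Int), u) < toLex (-(y : Int), v) ↔ (x > y ∨ (x = y ∧ u < v)) := by
  rw [Prod.Lex.lt_iff]
  simp only [ofLex_toLex]
  constructor
  · rintro (h | ⟨h1, h2⟩)
    · left; omega
    · right; exact ⟨by omega, h2⟩
  · rintro (h | ⟨h1, h2⟩)
    · left; omega
    · right; exact ⟨by omega, h2⟩

theorem step_eq_gStep (sl : List Char) (ans t : String) (h : t.toList ≠ []) :
    findLongestWordStep sl ans t = gStep sl ans t := by
  unfold findLongestWordStep gStep
  rcases ht : t.toList with _ | ⟨c, rest⟩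
  · exact absurd ht h
  · dsimp only
    by_cases hlen : (c :: rest).length > sl.length
    · rw [if_pos hlen]
      have hg : grSub sl (c :: rest) = false := by
        by_contra hf
        simp only [Bool.not_eq_false] at hf
        have := grSub_length_le _ _ hf
        omega
      rw [hg]
      simp
    · rw [if_neg hlen]
      by_cases hc : sl.contains c
      · have hcm : c ∈ sl := by simpa using hc
        rw [if_neg (by simp [hcm])]
        have h1 : (1 : Nat) ≤ (c :: rest).length := by simp
        have hloop := loop_eq_grSub sl (c :: rest) (sl.idxOf c + 1) 1 h1
        rw [show (c :: rest).drop 1 = rest from rfl] at hloop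
        rw [← grSub_idxOf sl c rest hcm] at hloop
        by_cases hj : findLongestWordLoop sl (c :: rest) (sl.idxOf c + 1) 1 = (c :: rest).length
        · have hg2 : grSub sl (c :: rest) = true := hloop.mp hj
          rw [hg2]
          have hkk : kkey t < kkey ans ↔ ((c :: rest).length > ans.toList.length ∨
              ((c :: rest).length = ans.toList.length ∧ c :: rest < ans.toList)) := by
            unfold kkey
            rw [ht]
            exact lexlt_iff _ _ _ _
          by_cases hcond : ((c :: rest).length > ans.toList.length ∨
              ((c :: rest).length = ans.toList.length ∧ c :: rest < ans.toList))
          · rw [if_pos ⟨hj, hcond⟩, if_pos (by simp [hkk.mpr hcond])]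
          · rw [if_neg (by tauto), if_neg (by simp; exact le_of_not_gt (fun hlt => hcond (hkk.mp hlt)))]
        · have hg2 : grSub sl (c :: rest) = false := by
            by_contra hf
            simp only [Bool.not_eq_false] at hf
            exact hj (hloop.mpr hf)
          rw [hg2]
          rw [if_neg (by tauto)]
          simp
      · rw [if_pos hc]
        have hg : grSub sl (c :: rest) = false := by
          by_contra hf
          simp only [Bool.not_eq_false] at hf
          have := grSub_head_mem _ _ _ hf
          simp [this] at hc
        rw [hg]
        simp

theorem kkey_inj : ∀ {a b : String}, kkey a = kkey b → a = b := by
  intro a b h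
  unfold kkey at h
  have h2 : a.toList = b.toList := congrArg (fun p => (ofLex p).2) h
  exact String.toList_injective h2

theorem fold_mem (sl : List Char) : ∀ (l : List String) (acc : String),
    l.foldl (gStep sl) acc = acc ∨
      (l.foldl (gStep sl) acc ∈ l ∧ grSub sl (l.foldl (gStep sl) acc).toList = true) := by
  intro l
  induction l with
  | nil => intro acc; left; rfl
  | cons x l ih =>
    intro acc
    rw [List.foldl_cons]
    rcases ih (gStep sl acc x) with h | ⟨h1, h2⟩
    · rw [h]
      unfold gStep
      by_cases hx : grSub sl x.toList && decide (kkey x < kkey acc)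
      · right
        rw [if_pos hx]
        exact ⟨List.mem_cons_self, by simpa using (Bool.and_eq_true_iff.mp hx).1⟩
      · left; rw [if_neg hx]
    · right
      exact ⟨List.mem_cons_of_mem _ h1, h2⟩

theorem fold_min (sl : List Char) : ∀ (l : List String) (acc : String),
    kkey (l.foldl (gStep sl) acc) ≤ kkey acc ∧
      ∀ t ∈ l, grSub sl t.toList = true → kkey (l.foldl (gStep sl) acc) ≤ kkey t := by
  intro l
  induction l with
  | nil => intro acc; exact ⟨le_refl _, by simp⟩
  | cons x l ih =>
    intro acc
    rw [List.foldl_cons]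
    obtain ⟨ih1, ih2⟩ := ih (gStep sl acc x)
    by_cases hx : grSub sl x.toList && decide (kkey x < kkey acc)
    · have hgx : gStep sl acc x = x := by unfold gStep; rw [if_pos hx]
      have hlt : kkey x < kkey acc := by simpa using (Bool.and_eq_true_iff.mp hx).2
      rw [hgx] at ih1 ih2 ⊢
      refine ⟨le_of_lt (lt_of_le_of_lt ih1 hlt), ?_⟩
      intro t ht hok
      rcases List.mem_cons.mp ht with rfl | ht'
      · exact ih1
      · exact ih2 t ht' hok
    · have hgx : gStep sl acc x = acc := by unfold gStep; rw [if_neg hx]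
      rw [hgx] at ih1 ih2 ⊢
      refine ⟨ih1, ?_⟩
      intro t ht hok
      rcases List.mem_cons.mp ht with rfl | ht'
      · have : ¬ kkey t < kkey acc := by
          intro hlt
          exact hx (by simp [hok, hlt])
        exact le_trans ih1 (le_of_not_gt this)
      · exact ih2 t ht' hok

theorem find?_key_min {α κ : Type} [LinearOrder κ] (key : α → κ) (p : α → Bool) :
    ∀ (L : List α) (m : α), L.Pairwise (fun a b => key a ≤ key b) → L.find? p = some m →
      ∀ y ∈ L, p y = true → key m ≤ key y := by
  intro L
  induction L with
  | nil => intro m _ hf; simp at hf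
  | cons a L ih =>
    intro m hp hf y hy hpy
    rw [List.pairwise_cons] at hp
    by_cases hpa : p a
    · rw [List.find?_cons_of_pos hpa] at hf
      cases hf
      rcases List.mem_cons.mp hy with rfl | hy'
      · exact le_refl _
      · exact hp.1 y hy'
    · rw [List.find?_cons_of_neg (by simpa using hpa)] at hf
      rcases List.mem_cons.mp hy with rfl | hy'
      · exact absurd hpy (by simpa using hpa)
      · exact ih m hp.2 hf y hy' hpy

theorem sorted2_eq_sorted_lex {α : Type} (xs : List α) (k1 : α → Int) (k2 : α → List Char) :
    PySem.List.sorted2 xs k1 k2 = PySem.List.sorted xs (fun x => toLex (k1 x, k2 x)) := by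
  unfold PySem.List.sorted2 PySem.List.sorted
  simp only [if_neg (by decide : ¬ (false = true))]
  congr 1
  funext acc x
  congr 1
  funext a b
  by_cases h1 : k1 a < k1 b
  · simp [h1, Prod.Lex.lt_iff]
  · by_cases h2 : k1 b < k1 a
    · simp [h1, h2, Prod.Lex.lt_iff]
      omega
    · have he : k1 a = k1 b := le_antisymm (le_of_not_gt h2) (le_of_not_gt h1)
      simp [Prod.Lex.lt_iff, he]

theorem toList_ne_nil_of_ne_empty {w : String} (h : w ≠ "") : w.toList ≠ [] := by
  intro hnil
  exact h (String.toList_injective (by simpa using hnil))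

theorem kkey_lt_empty {m : String} (h : m.toList ≠ []) : kkey m < kkey "" := by
  unfold kkey
  have : ("" : String).toList = [] := rfl
  rw [this]
  rw [lexlt_iff]
  left
  cases hm : m.toList with
  | nil => exact absurd hm h
  | cons a l => simp

theorem findLongestWord_spec' : ∀ (s : String) (dictionary : List String),
    "" ∉ dictionary →
    findLongestWord s dictionary = findLongestWord_alt s dictionary := by
  intro s dictionary hpre
  unfold findLongestWord findLongestWord_alt
  have hkeyfun : (fun w : String => toLex (-(PySem.Str.len w), w.toList)) = kkey := by
    funext w
    unfold kkey
    have : PySem.Str.len w = (w.toList.length : Int) := by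
      simp [PySem.Str.len]
    rw [this]
  rw [sorted2_eq_sorted_lex, hkeyfun]
  have hpfun : (fun w : String => subIter s.toList w.toList) = (fun w => grSub s.toList w.toList) := by
    funext w
    exact subIter_eq_grSub _ _
  rw [hpfun]
  have hfold : dictionary.foldl (findLongestWordStep s.toList) "" = dictionary.foldl (gStep s.toList) "" := by
    apply PySem.List.foldl_congr_mem
    intro acc x hx
    exact step_eq_gStep s.toList acc x (toList_ne_nil_of_ne_empty (fun he => hpre (he ▸ hx)))
  rw [hfold]
  set sl := s.toList
  set L := PySem.List.sorted dictionary kkey false with hL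
  have hperm : L.Perm dictionary := PySem.List.sorted_perm dictionary kkey false
  have hpair : L.Pairwise (fun a b => kkey a ≤ kkey b) := PySem.List.sorted_pairwise dictionary kkey
  set r := dictionary.foldl (gStep sl) "" with hr
  rcases hf : L.find? (fun w => grSub sl w.toList) with _ | m
  · -- no match
    have hnone := List.find?_eq_none.mp hf
    rcases fold_mem sl dictionary "" with h0 | ⟨hmem, hok⟩
    · rw [← hr] at h0; rw [h0, hf]; rfl
    · exfalso
      exact absurd hok (by simpa using hnone r (hperm.mem_iff.mpr hmem))
  · -- first match m
    have hpm : grSub sl m.toList = true := by simpa using List.find?_some hf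
    have hmL : m ∈ L := List.mem_of_find?_eq_some hf
    have hmd : m ∈ dictionary := hperm.mem_iff.mp hmL
    have hmin := find?_key_min kkey (fun w => grSub sl w.toList) L m hpair hf
    rcases fold_mem sl dictionary "" with h0 | ⟨hmem, hok⟩
    · exfalso
      have h1 : kkey r ≤ kkey m := (fold_min sl dictionary "").2 m hmd hpm
      rw [← hr] at h0
      rw [h0] at h1
      have h2 : kkey m < kkey "" :=
        kkey_lt_empty (toList_ne_nil_of_ne_empty (fun he => hpre (he ▸ hmd)))
      exact absurd (lt_of_le_of_lt h1 h2) (lt_irrefl _)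
    · have h1 : kkey r ≤ kkey m := (fold_min sl dictionary "").2 m hmd hpm
      have h2 : kkey m ≤ kkey r := hmin r (hperm.mem_iff.mpr hmem) (by simpa using hok)
      have : r = m := kkey_inj (le_antisymm h1 h2)
      rw [this, hf]
      rfl

-- ===== VERDICT (by name: the statement is the Claim_ definition above) =====
theorem findLongestWord_spec : Claim_equal_findLongestWord := by
  intro s dictionary _ hpre
  exact findLongestWord_spec' s dictionary hpre

@[simp] theorem findLongestWord_raises : Claim_raises_findLongestWord := by
  unfold Claim_raises_findLongestWord
  exact ⟨fun s d _ hr hp => hp hr, by decide⟩
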